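-- pv_equiv track=rewrite | github.com/palaniappan-mn/Competitive_Programming | Matrix_Summation.py | before
-- ===== SOURCE A (Python) =====
-- def before(after):
--
--     x_length = len(after)
--     y_length = len(after[0])
--
--     result = [[0 for j in range(y_length)] for i in range(x_length)] #initializing the result with zeroes
--
--     for x in range(x_length):
--         for y in range(y_length):
--             if x==0 and y==0: #for (0,0) element just both after and before are same
--                 result[x][y]=after[x][y]
--             elif y==0: #for first column subtract current element with previous element in the same column
--                 result[x][y] = after[x][y]-after[x-1][y]
--             elif x==0: #for first row subtract current element with previous element in the same row
--                 result[x][y] = after[x][y]-after[x][y-1]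
--             else: #for all other elements use the below formula
--                 result[x][y] = (after[x][y]+after[x-1][y-1]) - (after[x-1][y]+after[x][y-1])
--
--     return result
-- ===== SOURCE B (Python) =====
-- def before(after):
--     w = len(after[0])
--
--     def diff(xs):  # 1D difference with an implicit leading zero
--         return [b - a for a, b in zip([0] + xs, xs)]
--
--     row_diff = [diff(r[:w]) for r in after]
--     return [[b - a for a, b in zip(prev, cur)]
--             for prev, cur in zip([[0] * w] + row_diff, row_diff)]
-- ===== Notes on version B (the rewrite author's own statement) =====
-- stated objective: simpler
-- what changed: Replaces A's single pass with four explicit boundary branches and per-cell index writes by two uniform separable 1D difference passes (left-to-right row difference, then top-to-bottom column difference) built with zips and an implicit leading zero row/column, with no branching at all.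
-- outside the precondition, e.g. on before([]): A raises IndexError, B raises IndexError
import Mathlib
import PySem

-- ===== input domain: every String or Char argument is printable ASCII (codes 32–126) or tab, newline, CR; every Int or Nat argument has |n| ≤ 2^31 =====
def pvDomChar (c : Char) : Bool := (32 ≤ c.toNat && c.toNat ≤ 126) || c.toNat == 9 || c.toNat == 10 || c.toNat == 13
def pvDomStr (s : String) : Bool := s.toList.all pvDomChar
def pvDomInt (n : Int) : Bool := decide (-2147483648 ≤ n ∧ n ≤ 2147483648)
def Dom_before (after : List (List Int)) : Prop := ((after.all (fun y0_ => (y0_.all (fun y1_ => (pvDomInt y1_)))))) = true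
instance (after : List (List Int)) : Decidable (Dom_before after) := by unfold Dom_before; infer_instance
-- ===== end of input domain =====

-- B replaces A's four-branch single pass by two uniform 1D difference passes (rows, then
-- columns); objective: simpler.  Equality of the RETURN values is what is proved.

-- ===== PORT A =====
-- after[x][y] for nonnegative in-range indices (Pre_ keeps every index used in range;
-- x-1 / y-1 only occur under guards making them nonnegative):
def pvIdx (xs : List (List Int)) (x y : Nat) : Int := (xs.getD x []).getD y 0

def before (after : List (List Int)) : List (List Int) :=
  let xl := after.length
  let yl := (after.headD []).length   -- len(after[0]); Pre_ excludes empty after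
  let result := List.replicate xl (List.replicate yl (0 : Int))
  (List.range xl).foldl (fun res x =>
    (List.range yl).foldl (fun res y =>
      let v : Int :=
        if x = 0 ∧ y = 0 then pvIdx after x y
        else if y = 0 then pvIdx after x y - pvIdx after (x-1) y
        else if x = 0 then pvIdx after x y - pvIdx after x (y-1)
        else (pvIdx after x y + pvIdx after (x-1) (y-1)) -
             (pvIdx after (x-1) y + pvIdx after x (y-1))
      res.set x ((res.getD x []).set y v)) res) result

-- ===== PORT B =====
-- diff(xs) = [b - a for a, b in zip([0] + xs, xs)]
def pvDiff1 (xs : List Int) : List Int :=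
  (List.zip (0 :: xs) xs).map (fun p => p.2 - p.1)

def before_alt (after : List (List Int)) : List (List Int) :=
  let w := (after.headD []).length    -- len(after[0]); Pre_ excludes empty after
  let rowDiff := after.map (fun r => pvDiff1 (r.take w))   -- r[:w] = take w (w ≥ 0)
  (List.zip (List.replicate w (0 : Int) :: rowDiff) rowDiff).map
    (fun p => (List.zip p.1 p.2).map (fun q => q.2 - q.1))

-- ===== PRECONDITION & SPEC =====
-- A raises IndexError on [] (it reads after[0]) and whenever some row is shorter than
-- after[0] (it reads after[x][y] for every y < len(after[0])); exactly those are excluded.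
def Pre_before (after : List (List Int)) : Prop :=
  after ≠ [] ∧ ∀ r ∈ after, (after.headD []).length ≤ r.length
instance (after : List (List Int)) : Decidable (Pre_before after) := by
  unfold Pre_before; infer_instance

def pvWitness_before : List (List Int) := [[1, 2], [3, 4]]

def Spec_before (after : List (List Int)) (out : List (List Int)) : Prop := out = before_alt after
instance (after : List (List Int)) (out : List (List Int)) : Decidable (Spec_before after out) := by unfold Spec_before; infer_instance

-- ===== CLAIM (what is proved, stated in full; the proofs are below) =====
def Claim_equal_before : Prop := ∀ (after : List (List Int)), Dom_before after → Pre_before after → Spec_before after (before after)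

-- ===== LEMMAS AND PROOFS =====

-- the entry A writes at (x, y)
def pvF (after : List (List Int)) (x y : Nat) : Int :=
  if x = 0 ∧ y = 0 then pvIdx after x y
  else if y = 0 then pvIdx after x y - pvIdx after (x-1) y
  else if x = 0 then pvIdx after x y - pvIdx after x (y-1)
  else (pvIdx after x y + pvIdx after (x-1) (y-1)) -
       (pvIdx after (x-1) y + pvIdx after x (y-1))

-- setting cells of row x through the matrix = setting them in the row, then putting it back
theorem foldl_set_outer_lift (v : Nat → Int) (ys : List Nat) (res : List (List Int))
    (x : Nat) (hx : x < res.length) :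
    ys.foldl (fun r y => r.set x ((r.getD x []).set y (v y))) res
      = res.set x (ys.foldl (fun row y => row.set y (v y)) (res.getD x [])) := by
  induction ys generalizing res with
  | nil =>
      simp only [List.foldl_nil]
      rw [List.getD_eq_getElem?_getD, List.getElem?_eq_getElem hx]
      simp
  | cons y ys ih =>
      simp only [List.foldl_cons]
      rw [ih _ (by simpa using hx), List.set_set]
      have hget : (res.set x ((res.getD x []).set y (v y))).getD x []
          = (res.getD x []).set y (v y) := by
        simp [List.getD_eq_getElem?_getD, hx]
      rw [hget]

-- writing g y at every y < n overwrites the first n entries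
theorem foldl_set_range {α : Type} (g : Nat → α) (n : Nat) (row : List α) (h : n ≤ row.length) :
    (List.range n).foldl (fun r y => r.set y (g y)) row
      = (List.range n).map g ++ row.drop n := by
  induction n with
  | zero => simp
  | succ n ih =>
      rw [List.range_succ, List.foldl_append, List.map_append]
      rw [ih (by omega)]
      simp only [List.foldl_cons, List.foldl_nil]
      rw [List.set_append_right _ _ (by simp)]
      simp only [List.length_map, List.length_range, Nat.sub_self]
      have hd : row.drop n = row[n]'(by omega) :: row.drop (n + 1) :=
        List.drop_eq_getElem_cons (by omega)
      rw [hd, List.set_cons_zero]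
      simp

theorem pvDiff1_length (xs : List Int) : (pvDiff1 xs).length = xs.length := by
  simp [pvDiff1]

theorem pvDiff1_getElem (xs : List Int) (y : Nat) (hy : y < xs.length) :
    (pvDiff1 xs)[y]'(by rw [pvDiff1_length]; exact hy)
      = xs[y] - (if h0 : y = 0 then 0 else xs[y-1]'(by omega)) := by
  simp only [pvDiff1, List.getElem_map, List.getElem_zip]
  cases y with
  | zero => simp
  | succ k => simp

theorem pvIdx_eq (after : List (List Int)) (x y : Nat) (hx : x < after.length)
    (hy : y < (after[x]).length) : pvIdx after x y = after[x][y] := by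
  simp [pvIdx, List.getD_eq_getElem?_getD, hx, hy]

theorem outer_char (after : List (List Int)) (yl n : Nat) (res : List (List Int))
    (hn : n ≤ res.length) (hrow : ∀ r ∈ res, r.length = yl) :
    (List.range n).foldl (fun res x =>
        (List.range yl).foldl
          (fun res y => res.set x ((res.getD x []).set y (pvF after x y))) res) res
      = (List.range n).map (fun x => (List.range yl).map (fun y => pvF after x y))
        ++ res.drop n := by
  induction n with
  | zero => simp
  | succ n ih =>
      rw [List.range_succ, List.foldl_append, ih (by omega)]
      simp only [List.foldl_cons, List.foldl_nil]
      have hreslen : n < res.length := by omega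
      have hx : n < ((List.range n).map (fun x => (List.range yl).map (fun y => pvF after x y))
          ++ res.drop n).length := by
        simp; omega
      rw [foldl_set_outer_lift _ _ _ _ hx]
      have hget : ((List.range n).map (fun x => (List.range yl).map (fun y => pvF after x y))
          ++ res.drop n).getD n [] = res[n] := by
        rw [List.getD_eq_getElem?_getD, List.getElem?_append_right (by simp)]
        simp [List.getElem?_drop, List.getElem?_eq_getElem hreslen]
      rw [hget]
      have hrlen : (res[n]).length = yl := hrow _ (List.getElem_mem _)
      rw [foldl_set_range _ yl _ (by omega)]
      have hdrop : (res[n]).drop yl = [] := List.drop_eq_nil_of_le (by omega)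
      rw [hdrop, List.append_nil]
      rw [List.set_append_right _ _ (by simp)]
      simp only [List.length_map, List.length_range, Nat.sub_self]
      have hd : res.drop n = res[n] :: res.drop (n + 1) := List.drop_eq_getElem_cons (by omega)
      rw [hd, List.set_cons_zero]
      simp

theorem before_char (after : List (List Int)) :
    before after = (List.range after.length).map (fun x =>
      (List.range (after.headD []).length).map (fun y => pvF after x y)) := by
  have h := outer_char after (after.headD []).length after.length
      (List.replicate after.length (List.replicate (after.headD []).length 0))
      (by simp)
      (by intro r hr; rw [List.eq_of_mem_replicate hr]; simp)
  rw [show before after = (List.range after.length).foldl (fun res x =>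
        (List.range (after.headD []).length).foldl
          (fun res y => res.set x ((res.getD x []).set y (pvF after x y))) res)
        (List.replicate after.length
          (List.replicate (after.headD []).length 0)) from rfl, h]
  simp

theorem before_alt_char (after : List (List Int)) (hne : after ≠ [])
    (hrow : ∀ r ∈ after, (after.headD []).length ≤ r.length) :
    before_alt after = (List.range after.length).map (fun x =>
      (List.range (after.headD []).length).map (fun y => pvF after x y)) := by
  cases after with
  | nil => exact absurd rfl hne
  | cons a0 rest =>
    have hW : ∀ (i : Nat) (hi : i < (a0 :: rest).length),
        a0.length ≤ (((a0 :: rest))[i]).length := by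
      intro i hi
      have h := hrow _ (List.getElem_mem hi)
      simpa using h
    rw [show before_alt (a0 :: rest)
        = (List.zip (List.replicate a0.length (0 : Int)
              :: (a0 :: rest).map (fun r => pvDiff1 (r.take a0.length)))
            ((a0 :: rest).map (fun r => pvDiff1 (r.take a0.length)))).map
            (fun p => (List.zip p.1 p.2).map (fun q => q.2 - q.1)) from rfl]
    rw [show ((a0 :: rest).headD []).length = a0.length from rfl]
    apply List.ext_getElem
    · simp
    · intro x hx1 hx2
      have hx : x < (a0 :: rest).length := by simpa using hx2
      simp only [List.getElem_map, List.getElem_zip, List.getElem_range]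
      cases x with
      | zero =>
          simp only [List.getElem_cons_zero]
          apply List.ext_getElem
          · simp [pvDiff1_length]
          · intro y hy1 hy2
            have hy : y < a0.length := by simpa using hy2
            have hty : y < (a0.take a0.length).length := by simp; omega
            simp only [List.getElem_map, List.getElem_zip, List.getElem_range,
              List.getElem_replicate]
            rw [pvDiff1_getElem _ _ hty]
            simp only [List.getElem_take]
            unfold pvF
            rcases Nat.eq_zero_or_pos y with h0 | h0
            · subst h0
              rw [pvIdx_eq (a0 :: rest) 0 0 hx
                (by simp only [List.getElem_cons_zero]; omega)]
              simp
            · rw [pvIdx_eq (a0 :: rest) 0 y hx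
                  (by simp only [List.getElem_cons_zero]; omega),
                pvIdx_eq (a0 :: rest) 0 (y - 1) hx
                  (by simp only [List.getElem_cons_zero]; omega)]
              simp [Nat.pos_iff_ne_zero.mp h0]
      | succ k =>
          have hk : k < (a0 :: rest).length := by omega
          have hkr : k < rest.length := by simpa using hx
          have hwk : a0.length ≤ ((a0 :: rest)[k]'hk).length := hW k hk
          have hwk1 : a0.length ≤ (rest[k]'hkr).length := by
            have h := hW (k + 1) hx
            simpa using h
          simp only [List.getElem_cons_succ, List.getElem_map]
          apply List.ext_getElem
          · simp only [List.length_map, List.length_zip, List.length_range,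
              pvDiff1_length, List.length_take]
            omega
          · intro y hy1 hy2
            have hy : y < a0.length := by simpa using hy2
            have htk : y < (((a0 :: rest)[k]'hk).take a0.length).length := by
              simp; omega
            have htk1 : y < ((rest[k]'hkr).take a0.length).length := by
              simp; omega
            simp only [List.getElem_map, List.getElem_zip, List.getElem_range]
            rw [pvDiff1_getElem _ _ htk, pvDiff1_getElem _ _ htk1]
            simp only [List.getElem_take]
            unfold pvF
            simp only [Nat.add_sub_cancel]
            rcases Nat.eq_zero_or_pos y with h0 | h0
            · subst h0
              rw [pvIdx_eq (a0 :: rest) (k + 1) 0 hx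
                  (by simp only [List.getElem_cons_succ]; omega),
                pvIdx_eq (a0 :: rest) k 0 hk (by omega)]
              simp
            · rw [pvIdx_eq (a0 :: rest) (k + 1) y hx
                  (by simp only [List.getElem_cons_succ]; omega),
                pvIdx_eq (a0 :: rest) k y hk (by omega),
                pvIdx_eq (a0 :: rest) (k + 1) (y - 1) hx
                  (by simp only [List.getElem_cons_succ]; omega),
                pvIdx_eq (a0 :: rest) k (y - 1) hk (by omega)]
              have hne0 : ¬ (y = 0) := Nat.pos_iff_ne_zero.mp h0
              rw [if_neg (by exact fun h => hne0 h.2), if_neg hne0,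
                if_neg (Nat.succ_ne_zero k), dif_neg hne0, dif_neg hne0]
              simp only [List.getElem_cons_succ]
              ring

-- ===== VERDICT (by name: the statement is the Claim_ definition above) =====
theorem before_spec : Claim_equal_before := by
  intro after _ hpre
  unfold Spec_before
  rw [before_char, before_alt_char after hpre.1 hpre.2]
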